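-- pv_equiv track=rewrite | github.com/taolusi/SECURE | src/models/coref_scorer.py | muc
-- ===== SOURCE A (Python) =====
-- def muc(clusters, mention_to_gold):
--     tp, p = 0, 0
--     for c in clusters:
--         p += len(c) - 1
--         tp += len(c)
--         linked = set()
--         for m in c:
--             if m in mention_to_gold:
--                 linked.add(tuple(mention_to_gold[m]))
--             else:
--                 tp -= 1
--         tp -= len(linked)
--     return tp, p
-- ===== SOURCE B (Python) =====
-- def muc(clusters, mention_to_gold):
--     # Global (staged) formulation: p = total mentions - number of clusters;
--     # tp = (#gold-mapped mentions) - (#distinct (cluster-index, gold-cluster) pairs),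
--     # since within each cluster tp counts duplicates among gold keys, and tagging
--     # gold keys with the cluster index keys of different clusters never collide.
--     total = sum(map(len, clusters))
--     p = total - len(clusters)
--     found = [(i, tuple(mention_to_gold[m]))
--              for i, c in enumerate(clusters)
--              for m in c
--              if m in mention_to_gold]
--     tp = len(found) - len(set(found))
--     return tp, p
-- ===== Notes on version B (the rewrite author's own statement) =====
-- stated objective: alternative
-- what changed: Replaced A's per-cluster incremental accounting (running tp with per-mention decrements and a per-cluster 'linked' set) by a global staged computation: p is the closed form total_mentions - len(clusters), and tp is computed in one flat pass as the number of duplicates in the single global multiset of (cluster_index, gold_key) pairs, deduplicated once.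
import Mathlib
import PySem

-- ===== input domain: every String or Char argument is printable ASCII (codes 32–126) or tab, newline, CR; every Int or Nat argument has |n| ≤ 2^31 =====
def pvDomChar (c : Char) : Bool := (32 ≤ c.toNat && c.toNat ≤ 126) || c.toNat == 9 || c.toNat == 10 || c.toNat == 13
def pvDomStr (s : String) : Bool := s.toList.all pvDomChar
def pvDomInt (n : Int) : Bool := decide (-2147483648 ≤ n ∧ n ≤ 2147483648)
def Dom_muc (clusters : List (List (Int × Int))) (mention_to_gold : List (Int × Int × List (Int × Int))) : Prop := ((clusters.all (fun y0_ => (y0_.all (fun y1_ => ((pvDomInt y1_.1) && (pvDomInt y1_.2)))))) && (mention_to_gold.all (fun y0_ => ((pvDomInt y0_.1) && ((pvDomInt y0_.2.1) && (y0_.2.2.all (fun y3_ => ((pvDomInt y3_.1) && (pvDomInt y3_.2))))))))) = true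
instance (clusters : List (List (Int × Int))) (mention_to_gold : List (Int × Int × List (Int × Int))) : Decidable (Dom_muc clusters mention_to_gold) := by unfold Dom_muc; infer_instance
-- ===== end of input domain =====

-- B replaces A's per-cluster incremental accounting by a global staged computation:
-- p = total mentions - number of clusters, tp = duplicates in one global deduplicated
-- list of (cluster index, gold key) pairs (objective: alternative).

-- 'm in mention_to_gold' / 'mention_to_gold[m]' on the association list: first matching key
-- (Python dict lookup); the membership test and the lookup are the one first-match scan.
def lookMG (mention_to_gold : List (Int × Int × List (Int × Int))) (m : Int × Int) : Option (List (Int × Int)) :=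
  match mention_to_gold with
  | [] => none
  | (a, b, g) :: rest => if (a, b) = m then some g else lookMG rest m

-- ===== PORT A =====
def muc (clusters : List (List (Int × Int))) (mention_to_gold : List (Int × Int × List (Int × Int))) : Int × Int :=
  clusters.foldl
    (fun (s : Int × Int) c =>
      let p := s.2 + (c.length : Int) - 1
      let tp0 := s.1 + (c.length : Int)
      let r := c.foldl
        (fun (t : Int × PySem.Set (List (Int × Int))) m =>
          match lookMG mention_to_gold m with
          | some g => (t.1, t.2.add g)
          | none => (t.1 - 1, t.2))
        (tp0, PySem.Set.empty)
      (r.1 - (r.2.length : Int), p))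
    (0, 0)

-- ===== PORT B =====
def muc_alt (clusters : List (List (Int × Int))) (mention_to_gold : List (Int × Int × List (Int × Int))) : Int × Int :=
  let total : Int := (clusters.map (fun c => (c.length : Int))).sum
  let p : Int := total - (clusters.length : Int)
  let found : List (Int × List (Int × Int)) :=
    (PySem.List.enumerate clusters).flatMap
      (fun ic => ic.2.filterMap (fun m => (lookMG mention_to_gold m).map (fun g => (ic.1, g))))
  let tp : Int := (found.length : Int) - ((PySem.Set.ofList found).length : Int)
  (tp, p)

-- ===== PRECONDITION & SPEC =====
def Spec_muc (clusters : List (List (Int × Int))) (mention_to_gold : List (Int × Int × List (Int × Int))) (out : Int × Int) : Prop := out = muc_alt clusters mention_to_gold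
instance (clusters : List (List (Int × Int))) (mention_to_gold : List (Int × Int × List (Int × Int))) (out : Int × Int) : Decidable (Spec_muc clusters mention_to_gold out) := by unfold Spec_muc; infer_instance

-- ===== CLAIM (what is proved, stated in full; the proofs are below) =====
def Claim_equal_muc : Prop := ∀ (clusters : List (List (Int × Int))) (mention_to_gold : List (Int × Int × List (Int × Int))), Dom_muc clusters mention_to_gold → Spec_muc clusters mention_to_gold (muc clusters mention_to_gold)

-- ===== LEMMAS AND PROOFS =====

-- A's inner loop over one cluster: the tp component loses one per unmapped mention, the set collects the gold keys.
theorem muc_inner (mg : List (Int × Int × List (Int × Int))) (c : List (Int × Int))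
    (t0 : Int) (l0 : PySem.Set (List (Int × Int))) :
    c.foldl
      (fun (t : Int × PySem.Set (List (Int × Int))) m =>
        match lookMG mg m with
        | some g => (t.1, t.2.add g)
        | none => (t.1 - 1, t.2))
      (t0, l0)
    = (t0 - ((c.length : Int) - ((c.filterMap (lookMG mg)).length : Int)),
       PySem.Set.update l0 (c.filterMap (lookMG mg))) := by
  induction c generalizing t0 l0 with
  | nil => simp [PySem.Set.update]
  | cons m c ih =>
    cases h : lookMG mg m with
    | some g =>
      simp only [List.foldl_cons, h, List.filterMap_cons, PySem.Set.update, List.length_cons]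
      rw [ih]
      simp only [Prod.mk.injEq, PySem.Set.update]
      exact ⟨by push_cast; ring, trivial⟩
    | none =>
      simp only [List.foldl_cons, h, List.filterMap_cons, PySem.Set.update, List.length_cons]
      rw [ih]
      simp only [Prod.mk.injEq, PySem.Set.update]
      exact ⟨by push_cast; ring, trivial⟩

-- the gold keys of one cluster
def golds (mg : List (Int × Int × List (Int × Int))) (c : List (Int × Int)) : List (List (Int × Int)) :=
  c.filterMap (lookMG mg)

-- A's outer loop from an arbitrary accumulator: the accumulator plus per-cluster sums.
theorem muc_outer (mg : List (Int × Int × List (Int × Int))) (clusters : List (List (Int × Int)))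
    (tp0 p0 : Int) :
    clusters.foldl
      (fun (s : Int × Int) c =>
        let p := s.2 + (c.length : Int) - 1
        let tp0 := s.1 + (c.length : Int)
        let r := c.foldl
          (fun (t : Int × PySem.Set (List (Int × Int))) m =>
            match lookMG mg m with
            | some g => (t.1, t.2.add g)
            | none => (t.1 - 1, t.2))
          (tp0, PySem.Set.empty)
        (r.1 - (r.2.length : Int), p))
      (tp0, p0)
    = (tp0 + (clusters.map (fun c => ((golds mg c).length : Int)
          - ((PySem.Set.ofList (golds mg c)).length : Int))).sum,
       p0 + (clusters.map (fun c => (c.length : Int) - 1)).sum) := by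
  induction clusters generalizing tp0 p0 with
  | nil => simp
  | cons c cs ih =>
    simp only [List.foldl_cons, List.map_cons, List.sum_cons]
    rw [muc_inner]
    have hset : PySem.Set.update (PySem.Set.empty) (c.filterMap (lookMG mg))
        = PySem.Set.ofList (c.filterMap (lookMG mg)) := by
      rw [PySem.Set.ofList_eq_foldl]; rfl
    rw [hset, ih]
    apply Prod.ext <;> simp [golds] <;> ring

-- tagging a cluster's gold keys with the cluster index is a map of the gold-key list
theorem tagged_eq_map (mg : List (Int × Int × List (Int × Int))) (i : Int) (c : List (Int × Int)) :
    c.filterMap (fun m => (lookMG mg m).map (fun g => (i, g)))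
    = (golds mg c).map (fun g => (i, g)) := by
  simp [golds, List.map_filterMap]

-- dedup of an injectively mapped list is the mapped dedup
theorem ofList_map_inj {α β : Type} [BEq α] [LawfulBEq α] [BEq β] [LawfulBEq β]
    (f : α → β) (hf : Function.Injective f) (l : List α) :
    PySem.Set.ofList (l.map f) = (PySem.Set.ofList l).map f := by
  induction l with
  | nil => rfl
  | cons x xs ih =>
    rw [List.map_cons, PySem.Set.ofList_cons, PySem.Set.ofList_cons, ih, List.map_cons]
    congr 1
    simp only [PySem.Set.discard, List.filter_map]
    congr 1
    apply List.filter_congr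
    intro y _
    simp [Function.comp, hf.eq_iff]

-- dedup of a disjoint concatenation is the concatenation of the dedups
theorem ofList_append_disjoint {α : Type} [BEq α] [LawfulBEq α] (l1 l2 : List α)
    (h : ∀ x ∈ l2, x ∉ l1) :
    PySem.Set.ofList (l1 ++ l2) = PySem.Set.ofList l1 ++ PySem.Set.ofList l2 := by
  rw [PySem.Set.ofList_append, PySem.Set.update_eq_append_filter]
  congr 1
  rw [List.filter_eq_self]
  intro y hy
  have hy2 : y ∈ l2 := (PySem.Set.mem_ofList l2 y).1 hy
  simp only [Bool.not_eq_eq_eq_not, Bool.not_true]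
  rw [← Bool.not_eq_true, PySem.Set.contains_iff, PySem.Set.mem_ofList]
  exact h y hy2

-- every pair produced from the enumerate tail carries an index ≥ the start
theorem fst_mem_flat_ge (mg : List (Int × Int × List (Int × Int)))
    (cs : List (List (Int × Int))) (s : Int) :
    ∀ x ∈ (PySem.List.enumerate cs s).flatMap
      (fun ic => ic.2.filterMap (fun m => (lookMG mg m).map (fun g => (ic.1, g)))),
      s ≤ x.1 := by
  induction cs generalizing s with
  | nil => simp [PySem.List.enumerate_nil]
  | cons c cs ih =>
    intro x hx
    simp only [PySem.List.enumerate_cons, List.flatMap_cons, List.mem_append] at hx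
    cases hx with
    | inl h =>
      rw [tagged_eq_map] at h
      obtain ⟨g, _, rfl⟩ := List.mem_map.1 h
      exact le_refl s
    | inr h =>
      have := ih (s + 1) x h
      omega

-- the size of the global deduplicated tagged list is the sum of the per-cluster dedup sizes
theorem len_ofList_flat (mg : List (Int × Int × List (Int × Int)))
    (cs : List (List (Int × Int))) (s : Int) :
    ((PySem.Set.ofList ((PySem.List.enumerate cs s).flatMap
        (fun ic => ic.2.filterMap (fun m => (lookMG mg m).map (fun g => (ic.1, g)))))).length : Int)
    = (cs.map (fun c => ((PySem.Set.ofList (golds mg c)).length : Int))).sum := by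
  induction cs generalizing s with
  | nil => simp [PySem.List.enumerate_nil, PySem.Set.ofList]
  | cons c cs ih =>
    simp only [PySem.List.enumerate_cons, List.flatMap_cons]
    rw [ofList_append_disjoint]
    · rw [List.length_append, tagged_eq_map,
        ofList_map_inj (fun g => (s, g)) (fun a b h => (Prod.mk.injEq _ _ _ _ ▸ h).2) (golds mg c),
        List.length_map, List.map_cons, List.sum_cons]
      push_cast
      rw [ih (s + 1)]
    · intro x hx hx1
      have h1 := fst_mem_flat_ge mg cs (s + 1) x hx
      rw [tagged_eq_map] at hx1
      obtain ⟨g, _, rfl⟩ := List.mem_map.1 hx1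
      omega

-- the length of the global flat list is the sum of the per-cluster gold-key counts
theorem len_flat (mg : List (Int × Int × List (Int × Int)))
    (cs : List (List (Int × Int))) (s : Int) :
    (((PySem.List.enumerate cs s).flatMap
        (fun ic => ic.2.filterMap (fun m => (lookMG mg m).map (fun g => (ic.1, g))))).length : Int)
    = (cs.map (fun c => ((golds mg c).length : Int))).sum := by
  induction cs generalizing s with
  | nil => simp [PySem.List.enumerate_nil]
  | cons c cs ih =>
    simp only [PySem.List.enumerate_cons, List.flatMap_cons]
    rw [List.length_append, tagged_eq_map, List.length_map, List.map_cons, List.sum_cons]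
    push_cast
    rw [ih (s + 1)]

-- pointwise difference of sums
theorem sum_map_sub (l : List (List (Int × Int))) (f g : List (Int × Int) → Int) :
    (l.map (fun x => f x - g x)).sum = (l.map f).sum - (l.map g).sum := by
  induction l with
  | nil => simp
  | cons x xs ih => simp [ih]; ring

-- ===== VERDICT (by name: the statement is the Claim_ definition above) =====
theorem muc_spec : Claim_equal_muc := by
  intro clusters mg _
  show muc clusters mg = muc_alt clusters mg
  simp only [muc, muc_alt]
  rw [muc_outer, len_ofList_flat, len_flat,
    sum_map_sub clusters (fun c => ((golds mg c).length : Int)) (fun c => ((PySem.Set.ofList (golds mg c)).length : Int)),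
    sum_map_sub clusters (fun c => (c.length : Int)) (fun _ => (1 : Int))]
  apply Prod.ext
  · simp
  · simp
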